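-- pv_equiv track=rewrite | github.com/neko-rr/oshi-app | services/product_color_tag_service.py | _validate_slots
-- ===== SOURCE A (Python) =====
-- from typing import Dict, List, Optional
--
-- def _validate_slots(slots: List[int]) -> List[int]:
--     """1..7 のユニークな整数スロットだけにする（最大7件）。"""
--     clean = []
--     seen = set()
--     for s in slots or []:
--         try:
--             si = int(s)
--         except Exception:
--             continue
--         if 1 <= si <= 7 and si not in seen:
--             clean.append(si)
--             seen.add(si)
--         if len(clean) >= 7:
--             break
--     return clean
-- ===== SOURCE B (Python) =====
-- def _validate_slots(slots):
--     """1..7 のユニークな整数スロットだけにする（最大7件）。"""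
--     vals = []
--     for s in slots or []:
--         try:
--             vals.append(int(s))
--         except Exception:
--             pass
--     # iterate over the VALUE domain 1..7: first occurrence position of each present value
--     firsts = [(v, vals.index(v)) for v in range(1, 8) if v in vals]
--     firsts.sort(key=lambda vi: vi[1])
--     return [v for v, _ in firsts]
-- ===== Notes on version B (the rewrite author's own statement) =====
-- stated objective: alternative
-- what changed: B iterates over the value domain 1..7 instead of over the input: it records each present value's first-occurrence index, sorts these at most 7 pairs by index and outputs the values; A's per-element seen-set loop with an early break disappears entirely.
import Mathlib
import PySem

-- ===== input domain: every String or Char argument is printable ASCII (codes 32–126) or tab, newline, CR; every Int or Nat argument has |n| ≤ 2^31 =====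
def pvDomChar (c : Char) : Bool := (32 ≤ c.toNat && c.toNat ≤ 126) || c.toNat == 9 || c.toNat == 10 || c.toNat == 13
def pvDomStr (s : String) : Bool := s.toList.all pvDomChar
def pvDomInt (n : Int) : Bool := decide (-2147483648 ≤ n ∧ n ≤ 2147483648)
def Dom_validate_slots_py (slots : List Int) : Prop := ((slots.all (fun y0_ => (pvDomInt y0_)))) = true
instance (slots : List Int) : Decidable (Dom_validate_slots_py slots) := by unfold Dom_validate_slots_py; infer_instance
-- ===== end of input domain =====

-- B iterates over the value domain 1..7 (first-occurrence index of each present value, sorted by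
-- index) instead of A's per-element loop with a seen-set and early break; same output, alternative algorithm.


-- ===== PORT A =====
-- the for-loop with `clean`, `seen` and the early `break` when len(clean) >= 7
-- (int(s) on an Int argument is the identity and never raises, so the try/except is the identity here)
def pvALoop (rest : List Int) (clean : List Int) (seen : PySem.Set Int) : List Int :=
  match rest with
  | [] => clean
  | s :: rest' =>
      let st :=
        if 1 ≤ s ∧ s ≤ 7 ∧ ¬ (PySem.Set.contains seen s = true) then
          (clean ++ [s], PySem.Set.add seen s)
        else (clean, seen)
      if 7 ≤ st.1.length then st.1 else pvALoop rest' st.1 st.2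

def validate_slots_py (slots : List Int) : List Int :=
  pvALoop slots [] PySem.Set.empty

-- ===== PORT B =====
-- `vals`: int(s) on an Int is the identity and never raises, so the try/except append keeps every element
-- vals.index(v) is guarded by `v in vals`, so index? is always `some`; getD 0 is never the default
def validate_slots_py_alt (slots : List Int) : List Int :=
  let vals := slots
  let firsts := ((PySem.List.pyRange 1 8 1).filter (fun v => decide (v ∈ vals))).map
      (fun v => (v, ((PySem.List.index? vals v).getD 0 : Nat)))
  (PySem.List.sorted firsts (fun vi => vi.2) false).map (fun vi => vi.1)

-- ===== PRECONDITION & SPEC =====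
def Spec_validate_slots_py (slots : List Int) (out : List Int) : Prop := out = validate_slots_py_alt slots
instance (slots : List Int) (out : List Int) : Decidable (Spec_validate_slots_py slots out) := by unfold Spec_validate_slots_py; infer_instance

-- ===== CLAIM (what is proved, stated in full; the proofs are below) =====
def Claim_equal_validate_slots_py : Prop := ∀ (slots : List Int), Dom_validate_slots_py slots → Spec_validate_slots_py slots (validate_slots_py slots)

-- ===== LEMMAS AND PROOFS =====

-- pigeonhole: 7 distinct integers in [1,7] are all of them
lemma pv_full (clean : List Int) (hnd : clean.Nodup)
    (hmem : ∀ x ∈ clean, 1 ≤ x ∧ x ≤ 7) (hlen : 7 ≤ clean.length) :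
    ∀ y : Int, 1 ≤ y → y ≤ 7 → y ∈ clean := by
  intro y h1 h7
  have hsub : clean.toFinset ⊆ Finset.Icc (1 : Int) 7 := by
    intro x hx
    rcases hmem x (List.mem_toFinset.mp hx) with ⟨a, b⟩
    exact Finset.mem_Icc.mpr ⟨a, b⟩
  have hcard : (Finset.Icc (1 : Int) 7).card ≤ clean.toFinset.card := by
    rw [List.toFinset_card_of_nodup hnd]
    simpa using hlen
  have heq := Finset.eq_of_subset_of_card_le hsub hcard
  have : y ∈ clean.toFinset := heq ▸ Finset.mem_Icc.mpr ⟨h1, h7⟩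
  exact List.mem_toFinset.mp this

-- once every value of 1..7 is in acc, the filtered fold adds nothing
lemma pv_saturated (rest acc : List Int)
    (hall : ∀ y : Int, 1 ≤ y → y ≤ 7 → y ∈ acc) :
    rest.foldl (fun a s => if 1 ≤ s ∧ s ≤ 7 then PySem.Set.add a s else a) acc = acc := by
  induction rest with
  | nil => rfl
  | cons s rest ih =>
      simp only [List.foldl_cons]
      split_ifs with h
      · have hmem : s ∈ acc := hall s h.1 h.2
        have : PySem.Set.add acc s = acc := by
          simp [PySem.Set.add, PySem.Set.contains, hmem]
        rw [this]; exact ih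
      · exact ih

-- A's loop, run with seen = clean (as a list), computes the filtered Set.add fold
lemma pv_loop_eq (rest : List Int) :
    ∀ clean : List Int, clean.Nodup → (∀ x ∈ clean, 1 ≤ x ∧ x ≤ 7) → clean.length < 7 →
    pvALoop rest clean clean =
      rest.foldl (fun a s => if 1 ≤ s ∧ s ≤ 7 then PySem.Set.add a s else a) clean := by
  induction rest with
  | nil => intro clean _ _ _; rfl
  | cons s rest ih =>
    intro clean hnd hmem hlen
    rw [List.foldl_cons]
    by_cases hP : 1 ≤ s ∧ s ≤ 7
    · by_cases hin : s ∈ clean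
      · have hc : PySem.Set.contains clean s = true := by
          simp [PySem.Set.contains, hin]
        have hcond : ¬ (1 ≤ s ∧ s ≤ 7 ∧ ¬ (PySem.Set.contains clean s = true)) :=
          fun h => h.2.2 hc
        have hadd : PySem.Set.add clean s = clean := by
          simp [PySem.Set.add, PySem.Set.contains, hin]
        show (if 7 ≤ (if 1 ≤ s ∧ s ≤ 7 ∧ ¬ (PySem.Set.contains clean s = true) then
                (clean ++ [s], PySem.Set.add clean s) else (clean, clean)).1.length then _ else _) = _
        rw [if_neg hcond]
        show (if 7 ≤ clean.length then clean else pvALoop rest clean clean) = _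
        rw [if_neg (by omega), if_pos hP, hadd]
        exact ih clean hnd hmem hlen
      · have hc : ¬ (PySem.Set.contains clean s = true) := by
          simp [PySem.Set.contains, hin]
        have hadd : PySem.Set.add clean s = clean ++ [s] := by
          simp [PySem.Set.add, PySem.Set.contains, hin]
        have hcond : 1 ≤ s ∧ s ≤ 7 ∧ ¬ (PySem.Set.contains clean s = true) :=
          ⟨hP.1, hP.2, hc⟩
        show (if 7 ≤ (if 1 ≤ s ∧ s ≤ 7 ∧ ¬ (PySem.Set.contains clean s = true) then
                (clean ++ [s], PySem.Set.add clean s) else (clean, clean)).1.length then _ else _) = _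
        rw [if_pos hcond, hadd]
        show (if 7 ≤ (clean ++ [s]).length then clean ++ [s]
                else pvALoop rest (clean ++ [s]) (clean ++ [s])) = _
        rw [if_pos hP]
        have hnd' : (clean ++ [s]).Nodup := by
          simp only [List.nodup_append, List.nodup_singleton, true_and]
          refine ⟨hnd, ?_⟩
          intro a ha b hb
          simp only [List.mem_singleton] at hb
          exact fun heq => hin ((hb ▸ heq) ▸ ha)
        have hmem' : ∀ x ∈ clean ++ [s], 1 ≤ x ∧ x ≤ 7 := by
          intro x hx
          rcases List.mem_append.mp hx with h | h
          · exact hmem x h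
          · simp at h; subst h; exact hP
        by_cases hbrk : 7 ≤ (clean ++ [s]).length
        · rw [if_pos hbrk]
          exact (pv_saturated rest (clean ++ [s]) (pv_full _ hnd' hmem' hbrk)).symm
        · rw [if_neg hbrk]
          exact ih (clean ++ [s]) hnd' hmem' (by omega)
    · have hcond : ¬ (1 ≤ s ∧ s ≤ 7 ∧ ¬ (PySem.Set.contains clean s = true)) :=
        fun h => hP ⟨h.1, h.2.1⟩
      show (if 7 ≤ (if 1 ≤ s ∧ s ≤ 7 ∧ ¬ (PySem.Set.contains clean s = true) then
              (clean ++ [s], PySem.Set.add clean s) else (clean, clean)).1.length then _ else _) = _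
      rw [if_neg hcond]
      show (if 7 ≤ clean.length then clean else pvALoop rest clean clean) = _
      rw [if_neg (by omega), if_neg hP]
      exact ih clean hnd hmem hlen

-- A computes the order-preserving dedup of the in-range filter
lemma pv_A_eq_dedup (slots : List Int) :
    validate_slots_py slots =
      PySem.List.dedup (slots.filter (fun s => decide (1 ≤ s ∧ s ≤ 7))) := by
  unfold validate_slots_py
  show pvALoop slots [] [] = _
  rw [pv_loop_eq slots [] List.nodup_nil (by simp) (by simp),
      PySem.List.dedup_eq_ofList, PySem.Set.ofList_eq_foldl,
      ← PySem.List.foldl_ite_eq_foldl_filter]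

-- rank of a value = its first index in slots (length when absent; only members matter)
def pvRank (l : List Int) (v : Int) : Nat := (PySem.List.index? l v).getD l.length

lemma pv_rank_lt (l : List Int) (v : Int) (h : v ∈ l) : pvRank l v < l.length := by
  unfold pvRank
  rcases Option.isSome_iff_exists.mp ((PySem.List.index?_isSome_iff l v).mpr h) with ⟨k, hk⟩
  rcases PySem.List.getElem_of_index?_eq_some hk with ⟨hlt, _, _⟩
  rw [hk]
  simpa using hlt

lemma pv_rank_append_of_mem (l : List Int) (x v : Int) (h : v ∈ l) :
    pvRank (l ++ [x]) v = pvRank l v := by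
  unfold pvRank
  rw [PySem.List.index?_append_of_mem _ h]
  rcases Option.isSome_iff_exists.mp ((PySem.List.index?_isSome_iff l v).mpr h) with ⟨k, hk⟩
  rw [hk]; rfl

lemma pv_rank_append_self (l : List Int) (x : Int) (h : x ∉ l) :
    pvRank (l ++ [x]) x = l.length := by
  unfold pvRank
  rw [PySem.List.index?_append_singleton_self l x h]
  rfl

-- the dedup of the in-range filter is strictly increasing in first-occurrence rank
lemma pv_dedup_pairwise (l : List Int) :
    (PySem.List.dedup (l.filter (fun s => decide (1 ≤ s ∧ s ≤ 7)))).Pairwise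
      (fun u w => pvRank l u < pvRank l w) := by
  induction l using List.reverseRecOn with
  | nil => simp [PySem.List.dedup]
  | append_singleton l x ih =>
    have hfil : (l ++ [x]).filter (fun s => decide (1 ≤ s ∧ s ≤ 7)) =
        l.filter (fun s => decide (1 ≤ s ∧ s ≤ 7)) ++
          (if 1 ≤ x ∧ x ≤ 7 then [x] else []) := by
      rw [List.filter_append]
      by_cases h : 1 ≤ x ∧ x ≤ 7 <;> simp [h]
    have hsub : ∀ v ∈ PySem.List.dedup (l.filter (fun s => decide (1 ≤ s ∧ s ≤ 7))), v ∈ l := by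
      intro v hv
      rw [PySem.List.dedup_eq_ofList, PySem.Set.mem_ofList] at hv
      exact (List.mem_filter.mp hv).1
    have ih' : (PySem.List.dedup (l.filter (fun s => decide (1 ≤ s ∧ s ≤ 7)))).Pairwise
        (fun u w => pvRank (l ++ [x]) u < pvRank (l ++ [x]) w) := by
      refine List.Pairwise.imp_of_mem ?_ ih
      intro u w hu hw h
      rw [pv_rank_append_of_mem _ _ _ (hsub u hu), pv_rank_append_of_mem _ _ _ (hsub w hw)]
      exact h
    rw [hfil]
    have key : PySem.List.dedup (l.filter (fun s => decide (1 ≤ s ∧ s ≤ 7)) ++ [x]) =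
        PySem.Set.add (PySem.List.dedup (l.filter (fun s => decide (1 ≤ s ∧ s ≤ 7)))) x := by
      simp only [PySem.List.dedup_eq_ofList, PySem.Set.ofList_eq_foldl, List.foldl_append,
        List.foldl_cons, List.foldl_nil]
    have hmemD : x ∈ PySem.List.dedup (l.filter (fun s => decide (1 ≤ s ∧ s ≤ 7))) ↔
        x ∈ l.filter (fun s => decide (1 ≤ s ∧ s ≤ 7)) := by
      rw [PySem.List.dedup_eq_ofList]; exact PySem.Set.mem_ofList _ _
    by_cases hx : 1 ≤ x ∧ x ≤ 7
    · rw [if_pos hx]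
      by_cases hin : x ∈ l.filter (fun s => decide (1 ≤ s ∧ s ≤ 7))
      · have hstay : PySem.Set.add (PySem.List.dedup (l.filter (fun s => decide (1 ≤ s ∧ s ≤ 7)))) x =
            PySem.List.dedup (l.filter (fun s => decide (1 ≤ s ∧ s ≤ 7))) := by
          have hl : x ∈ l := (List.mem_filter.mp hin).1
          simp [PySem.Set.add, PySem.Set.contains, hl, hx.1, hx.2]
        rw [key, hstay]; exact ih'
      · have hxl : x ∉ l := fun h => hin (List.mem_filter.mpr ⟨h, by simp [hx]⟩)
        have hgrow : PySem.Set.add (PySem.List.dedup (l.filter (fun s => decide (1 ≤ s ∧ s ≤ 7)))) x =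
            PySem.List.dedup (l.filter (fun s => decide (1 ≤ s ∧ s ≤ 7))) ++ [x] := by
          simp [PySem.Set.add, PySem.Set.contains, hxl]
        rw [key, hgrow, List.pairwise_append]
        refine ⟨ih', List.pairwise_singleton _ _, ?_⟩
        intro u hu w hw
        simp only [List.mem_singleton] at hw
        subst hw
        rw [pv_rank_append_of_mem _ _ _ (hsub u hu), pv_rank_append_self _ _ hxl]
        exact pv_rank_lt l u (hsub u hu)
    · rw [if_neg hx]
      simpa using ih'

-- membership + nodup: dedup of the filter is a permutation of the value-domain scan 1..7
lemma pv_perm (slots : List Int) :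
    (PySem.List.dedup (slots.filter (fun s => decide (1 ≤ s ∧ s ≤ 7)))).Perm
      ((PySem.List.pyRange 1 8 1).filter (fun v => decide (v ∈ slots))) := by
  apply (List.perm_ext_iff_of_nodup ?_ ?_).mpr
  · intro a
    rw [PySem.List.dedup_eq_ofList, PySem.Set.mem_ofList, List.mem_filter,
        List.mem_filter, PySem.List.mem_pyRange_one]
    constructor
    · rintro ⟨h1, h2⟩
      simp only [decide_eq_true_eq] at h2
      exact ⟨⟨h2.1, by omega⟩, by simpa using h1⟩
    · rintro ⟨h1, h2⟩
      simp only [decide_eq_true_eq] at h2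
      exact ⟨h2, by simp; omega⟩
  · rw [PySem.List.dedup_eq_ofList]; exact PySem.Set.nodup_ofList _
  · exact (PySem.List.nodup_pyRange_one 1 8).filter _

-- for a member, the pair built by B carries exactly the rank
lemma pv_pair_rank (slots : List Int) (v : Int) (h : v ∈ slots) :
    ((PySem.List.index? slots v).getD 0 : Nat) = pvRank slots v := by
  unfold pvRank
  rcases Option.isSome_iff_exists.mp ((PySem.List.index?_isSome_iff slots v).mpr h) with ⟨k, hk⟩
  rw [hk]; rfl

-- ===== VERDICT (by name: the statement is the Claim_ definition above) =====
theorem validate_slots_py_spec : Claim_equal_validate_slots_py := by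
  intro slots _
  unfold Spec_validate_slots_py validate_slots_py_alt
  rw [pv_A_eq_dedup]
  set D := PySem.List.dedup (slots.filter (fun s => decide (1 ≤ s ∧ s ≤ 7))) with hD
  have hsubD : ∀ v ∈ D, v ∈ slots := by
    intro v hv
    rw [hD, PySem.List.dedup_eq_ofList, PySem.Set.mem_ofList] at hv
    exact (List.mem_filter.mp hv).1
  have hsorted :
      PySem.List.sorted
        (((PySem.List.pyRange 1 8 1).filter (fun v => decide (v ∈ slots))).map
          (fun v => (v, ((PySem.List.index? slots v).getD 0 : Nat))))
        (fun vi => vi.2) false =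
      D.map (fun v => (v, ((PySem.List.index? slots v).getD 0 : Nat))) := by
    apply PySem.List.sorted_eq_of_perm_of_pairwise_lt
    · exact (pv_perm slots).map _
    · rw [List.pairwise_map]
      refine List.Pairwise.imp_of_mem ?_ (pv_dedup_pairwise slots)
      intro u w hu hw h
      show ((PySem.List.index? slots u).getD 0) < ((PySem.List.index? slots w).getD 0)
      rw [pv_pair_rank slots u (hsubD u hu), pv_pair_rank slots w (hsubD w hw)]
      exact h
  simp only [hsorted, List.map_map]
  simp [Function.comp_def]
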